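-- pv_equiv track=rewrite | github.com/cathoderay/codechef | contests/april-challenge-2019/XORMIN.py | build_traversal
-- ===== SOURCE A (Python) =====
-- def build_traversal(e, m, s, i):
--     r = []
--     stack = [0]
--     p = {}
--     j = -1
--     prev = 0
--     while stack:
--         cur = stack[-1]
--         if not m[cur]:
--             m[cur] = True
--             j += 1
--             r.append(cur)
--             i[cur] = j
--         if e[cur]:
--             child = e[cur].pop()
--             if m[child]: continue
--             p[child] = cur
--             stack.append(child)
--             continue
--         leaf = stack.pop()
--         s[leaf] += 1
--         if leaf in p and p[leaf]:
--             s[p[leaf]] += s[leaf]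
--     return r, s, i
-- ===== SOURCE B (Python) =====
-- def build_traversal(e, m, s, i):
--     r = []
--     p = {}
--     c = 0
--
--     def dfs(u):
--         nonlocal c
--         if not m[u]:
--             m[u] = True
--             i[u] = c
--             c += 1
--             r.append(u)
--         while e[u]:
--             child = e[u].pop()
--             if m[child]:
--                 continue
--             p[child] = u
--             yield child
--         s[u] += 1
--         if u in p and p[u]:
--             s[p[u]] += s[u]
--
--     # run the recursion on an explicit chain of generators (no recursion limit)
--     chain = [dfs(0)]
--     while chain:
--         child = next(chain[-1], None)
--         if child is None:
--             chain.pop()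
--         else:
--             chain.append(dfs(child))
--     return r, s, i
-- ===== Notes on version B (the rewrite author's own statement) =====
-- stated objective: alternative
-- what changed: Replaces A's single while-loop state machine that peeks the top of an explicit stack and re-dispatches on marked/child/leaf every iteration by a recursive DFS (a per-node dfs generator that marks, lazily drains its child list, then finishes its subtree size; run on a chain of generators so deep graphs still work).
import Mathlib
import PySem

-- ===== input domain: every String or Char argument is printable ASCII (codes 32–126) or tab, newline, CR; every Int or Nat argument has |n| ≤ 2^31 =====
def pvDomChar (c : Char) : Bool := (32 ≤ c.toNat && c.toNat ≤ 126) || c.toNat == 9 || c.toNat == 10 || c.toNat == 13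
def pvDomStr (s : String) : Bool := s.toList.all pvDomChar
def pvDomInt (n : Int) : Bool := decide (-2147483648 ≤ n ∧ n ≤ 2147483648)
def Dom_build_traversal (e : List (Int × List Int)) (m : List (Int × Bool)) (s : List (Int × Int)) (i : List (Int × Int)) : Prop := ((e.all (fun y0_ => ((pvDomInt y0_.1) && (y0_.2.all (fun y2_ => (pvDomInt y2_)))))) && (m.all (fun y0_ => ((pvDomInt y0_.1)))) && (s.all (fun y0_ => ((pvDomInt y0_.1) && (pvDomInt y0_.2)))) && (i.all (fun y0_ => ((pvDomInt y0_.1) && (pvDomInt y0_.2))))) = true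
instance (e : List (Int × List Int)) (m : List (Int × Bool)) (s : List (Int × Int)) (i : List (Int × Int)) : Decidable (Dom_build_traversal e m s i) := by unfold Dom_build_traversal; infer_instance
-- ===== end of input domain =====

-- B replaces A's one-big-while-loop stack machine by a recursive DFS (alternative decomposition,
-- same O(V+E) cost); equivalence is about the RETURN value (both Pythons mutate e/m/s/i alike).

-- ===== PORT A =====
-- Hand port of Python dict access for the dicts used here (first-match lookup; assignment
-- overwrites the first matching key in place, appends a new key at the end) — exact for the
-- unique-key association lists that represent Python dicts.
def alGet? {α : Type} : List (Int × α) → Int → Option α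
  | [], _ => none
  | (k, v) :: t, x => if k == x then some v else alGet? t x

def alGetD {α : Type} (d : List (Int × α)) (k : Int) (dflt : α) : α := (alGet? d k).getD dflt

def alSet {α : Type} : List (Int × α) → Int → α → List (Int × α)
  | [], k, v => [(k, v)]
  | (k', v') :: t, k, v => if k' == k then (k, v) :: t else (k', v') :: alSet t k v

-- total number of edges still stored in e (termination measure of both ports)
def esizeAL (e : List (Int × List Int)) : Nat := (e.map (fun q => q.2.length)).sum

-- `e[cur].pop()` strictly shrinks the stored edge count (cited by the ports' termination proofs)
theorem esize_alSet_dropLast_lt (e : List (Int × List Int)) (k : Int)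
    (h : alGetD e k [] ≠ []) :
    esizeAL (alSet e k (alGetD e k []).dropLast) < esizeAL e := by
  induction e with
  | nil => simp [alGetD, alGet?] at h
  | cons q t ih =>
    obtain ⟨k', v⟩ := q
    by_cases hk : k' == k
    · have hv : alGetD ((k', v) :: t) k [] = v := by simp [alGetD, alGet?, hk]
      rw [hv] at h ⊢
      have hvlen : v.dropLast.length < v.length := by
        cases v with
        | nil => simp at h
        | cons a b => simp
      simp only [alSet, hk, if_pos]
      simpa [esizeAL] using hvlen
    · have hv : alGetD ((k', v) :: t) k [] = alGetD t k [] := by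
        simp [alGetD, alGet?, hk]
      rw [hv] at h ⊢
      have := ih h
      simp only [alSet, hk]
      simpa [esizeAL] using this

-- literal transliteration of A's while loop (stack, e, m, s, i, p, j, r are A's variables)
def aLoop (stack : List Int) (e : List (Int × List Int)) (m : List (Int × Bool))
    (s i p : List (Int × Int)) (j : Int) (r : List Int) :
    List Int × List (Int × Int) × List (Int × Int) :=
  match stack with
  | [] => (r, s, i)
  | cur :: rest =>
    let marked := alGetD m cur false
    let m1 := if marked then m else alSet m cur true
    let j1 := if marked then j else j + 1
    let r1 := if marked then r else r ++ [cur]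
    let i1 := if marked then i else alSet i cur (j + 1)
    let e0 := alGetD e cur []
    if he : e0 = [] then
      -- leaf branch (`if e[cur]:` false)
      let sv := alGetD s cur 0 + 1
      let s1 := alSet s cur sv
      let s2 :=
        match alGet? p cur with
        | some pl => if pl ≠ 0 then alSet s1 pl (alGetD s1 pl 0 + alGetD s1 cur 0) else s1
        | none => s1
      aLoop rest e m1 s2 i1 p j1 r1
    else
      -- `child = e[cur].pop()`
      let child := e0.getLast he
      let e1 := alSet e cur e0.dropLast
      if alGetD m1 child false then aLoop (cur :: rest) e1 m1 s i1 p j1 r1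
      else aLoop (child :: cur :: rest) e1 m1 s i1 (alSet p child cur) j1 r1
  termination_by (esizeAL e, stack.length)
  decreasing_by
  · exact Prod.Lex.right _ (by simp)
  · exact Prod.Lex.left _ _ (esize_alSet_dropLast_lt e cur he)
  · exact Prod.Lex.left _ _ (esize_alSet_dropLast_lt e cur he)

def build_traversal (e : List (Int × List Int)) (m : List (Int × Bool)) (s : List (Int × Int)) (i : List (Int × Int)) : List Int × (List (Int × Int)) × (List (Int × Int)) :=
  aLoop [0] e m s i [] (-1) []

-- ===== PORT B =====
-- the mutated program state of B (e, m, s, i, p as dicts, c the counter, r the order list)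
structure BSt where
  e : List (Int × List Int)
  m : List (Int × Bool)
  s : List (Int × Int)
  i : List (Int × Int)
  p : List (Int × Int)
  c : Int
  r : List Int
deriving Repr, DecidableEq

-- dfs's entry: `if not m[u]: m[u]=True; i[u]=c; c+=1; r.append(u)`
def markIf (u : Int) (st : BSt) : BSt :=
  if alGetD st.m u false then st
  else { st with m := alSet st.m u true, i := alSet st.i u st.c, c := st.c + 1, r := st.r ++ [u] }

-- dfs's exit: `s[u] += 1; if u in p and p[u]: s[p[u]] += s[u]`
def finishS (u : Int) (st : BSt) : BSt :=
  let sv := alGetD st.s u 0 + 1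
  let s1 := alSet st.s u sv
  let s2 :=
    match alGet? st.p u with
    | some pl => if pl ≠ 0 then alSet s1 pl (alGetD s1 pl 0 + alGetD s1 u 0) else s1
    | none => s1
  { st with s := s2 }

-- dfs(u) and its child-draining while loop; fuel is only a structural totality guard
-- (2*esizeAL e + 2 is always enough, as the equivalence proof shows)
mutual
def dfsB : Nat → Int → BSt → BSt
  | 0, _, st => st
  | fuel + 1, u, st => finishS u (drainB fuel u (markIf u st))

def drainB : Nat → Int → BSt → BSt
  | 0, _, st => st
  | fuel + 1, u, st =>
    let e0 := alGetD st.e u []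
    if he : e0 = [] then st
    else
      let st1 := { st with e := alSet st.e u e0.dropLast }
      let child := e0.getLast he
      if alGetD st1.m child false then drainB fuel u st1
      else drainB fuel u (dfsB fuel child { st1 with p := alSet st1.p child u })
end

def build_traversal_alt (e : List (Int × List Int)) (m : List (Int × Bool)) (s : List (Int × Int)) (i : List (Int × Int)) : List Int × (List (Int × Int)) × (List (Int × Int)) :=
  let st := dfsB (2 * esizeAL e + 2) 0 ⟨e, m, s, i, [], 0, []⟩
  (st.r, st.s, st.i)

-- ===== PRECONDITION & SPEC =====
def keyMem {α : Type} (d : List (Int × α)) (k : Int) : Bool := d.any (fun q => q.1 == k)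

-- Pre_ excludes exactly the inputs on which the Python raises KeyError.  The traversal drains
-- node 0 and, recursively, every initially-unmarked child of a drained node (reachD, a plain
-- graph closure of the input, no traversal state); A returns normally iff every such node has
-- its e/m/s keys and every child it lists has its m key.
def addNew (acc : List Int) (c : Int) : List Int := if acc.contains c then acc else acc ++ [c]

def stepD (e : List (Int × List Int)) (m : List (Int × Bool)) (S : List Int) : List Int :=
  S.foldl (fun acc u => (alGetD e u []).foldl
    (fun acc2 c => if alGetD m c false then acc2 else addNew acc2 c) acc) S

def reachD (e : List (Int × List Int)) (m : List (Int × Bool)) : List Int :=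
  (stepD e m)^[esizeAL e + 1] [0]

def Pre_build_traversal (e : List (Int × List Int)) (m : List (Int × Bool)) (s : List (Int × Int)) (i : List (Int × Int)) : Prop :=
  ((reachD e m).all (fun u => keyMem e u && keyMem m u && keyMem s u &&
    (alGetD e u []).all (fun c => keyMem m c))) = true

instance (e : List (Int × List Int)) (m : List (Int × Bool)) (s : List (Int × Int)) (i : List (Int × Int)) : Decidable (Pre_build_traversal e m s i) := by unfold Pre_build_traversal; infer_instance

def pvWitness_build_traversal : (List (Int × List Int)) × (List (Int × Bool)) × (List (Int × Int)) × (List (Int × Int)) :=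
  ([(0, [1]), (1, [])], [(0, false), (1, false)], [(0, 0), (1, 0)], [(0, 0), (1, 0)])

def Spec_build_traversal (e : List (Int × List Int)) (m : List (Int × Bool)) (s : List (Int × Int)) (i : List (Int × Int)) (out : List Int × (List (Int × Int)) × (List (Int × Int))) : Prop := out = build_traversal_alt e m s i
instance (e : List (Int × List Int)) (m : List (Int × Bool)) (s : List (Int × Int)) (i : List (Int × Int)) (out : List Int × (List (Int × Int)) × (List (Int × Int))) : Decidable (Spec_build_traversal e m s i out) := by unfold Spec_build_traversal; infer_instance

-- ===== CLAIM (what is proved, stated in full; the proofs are below) =====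
def Claim_equal_build_traversal : Prop := ∀ (e : List (Int × List Int)) (m : List (Int × Bool)) (s : List (Int × Int)) (i : List (Int × Int)), Dom_build_traversal e m s i → Pre_build_traversal e m s i → Spec_build_traversal e m s i (build_traversal e m s i)

-- ===== LEMMAS AND PROOFS =====

theorem alGet?_alSet {α : Type} (d : List (Int × α)) (k x : Int) (v : α) :
    alGet? (alSet d k v) x = if x == k then some v else alGet? d x := by
  induction d with
  | nil =>
    simp only [alSet, alGet?]
    by_cases h : x = k
    · subst h; simp
    · have h1 : (k == x) = false := by simp [Ne.symm h]
      have h2 : (x == k) = false := by simp [h]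
      rw [h1, h2]
  | cons q t ih =>
    obtain ⟨k', v'⟩ := q
    by_cases hk : k' = k
    · subst hk
      by_cases hx : x = k'
      · subst hx
        simp [alSet, alGet?]
      · have h1 : (x == k') = false := by simp [hx]
        have h2 : (k' == x) = false := by simp [Ne.symm hx]
        simp [alSet, alGet?, h1, h2]
    · have hk' : (k' == k) = false := by simp [hk]
      by_cases hx : x = k
      · subst hx
        have h2 : (k' == x) = false := by simp [hk]
        simp [alSet, alGet?, hk', h2, ih]
      · have h1 : (x == k) = false := by simp [hx]
        simp [alSet, alGet?, hk', h1, ih]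

theorem alGetD_alSet {α : Type} (d : List (Int × α)) (k x : Int) (v dflt : α) :
    alGetD (alSet d k v) x dflt = if x == k then v else alGetD d x dflt := by
  by_cases h : x = k <;> simp [alGetD, alGet?_alSet, h]

theorem markIf_e (u : Int) (st : BSt) : (markIf u st).e = st.e := by
  unfold markIf; split <;> rfl

theorem finishS_fields (u : Int) (st : BSt) :
    (finishS u st).e = st.e ∧ (finishS u st).m = st.m ∧ (finishS u st).i = st.i ∧
    (finishS u st).p = st.p ∧ (finishS u st).c = st.c ∧ (finishS u st).r = st.r := by
  unfold finishS; exact ⟨rfl, rfl, rfl, rfl, rfl, rfl⟩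

-- marks are never erased by dfs/drain
theorem marks_mono (fuel : Nat) :
    (∀ u st w, alGetD st.m w false = true → alGetD (dfsB fuel u st).m w false = true) ∧
    (∀ u st w, alGetD st.m w false = true → alGetD (drainB fuel u st).m w false = true) := by
  induction fuel with
  | zero => exact ⟨fun _ _ _ h => h, fun _ _ _ h => h⟩
  | succ f ih =>
    have hdrain : ∀ u st w, alGetD st.m w false = true →
        alGetD (drainB (f + 1) u st).m w false = true := by
      intro u st w h
      rw [drainB]
      by_cases he : alGetD st.e u [] = []
      · rw [dif_pos he]; exact h
      · rw [dif_neg he]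
        by_cases hc : alGetD st.m ((alGetD st.e u []).getLast he) false = true
        · rw [if_pos hc]; exact ih.2 u _ w h
        · rw [if_neg hc]; exact ih.2 u _ w (ih.1 _ _ w h)
    refine ⟨?_, hdrain⟩
    intro u st w h
    rw [dfsB, (finishS_fields u _).2.1]
    refine ih.2 u (markIf u st) w ?_
    unfold markIf
    split
    · exact h
    · simp only [alGetD_alSet]
      split <;> simp [h]

-- dfs/drain never grow the stored edge count
theorem esize_mono (fuel : Nat) :
    (∀ u st, esizeAL (dfsB fuel u st).e ≤ esizeAL st.e) ∧
    (∀ u st, esizeAL (drainB fuel u st).e ≤ esizeAL st.e) := by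
  induction fuel with
  | zero => exact ⟨fun _ _ => le_refl _, fun _ _ => le_refl _⟩
  | succ f ih =>
    have hdrain : ∀ u st, esizeAL (drainB (f + 1) u st).e ≤ esizeAL st.e := by
      intro u st
      rw [drainB]
      by_cases he : alGetD st.e u [] = []
      · rw [dif_pos he]
      · rw [dif_neg he]
        have hlt : esizeAL (alSet st.e u ((alGetD st.e u []).dropLast)) < esizeAL st.e :=
          esize_alSet_dropLast_lt st.e u he
        by_cases hc : alGetD st.m ((alGetD st.e u []).getLast he) false = true
        · rw [if_pos hc]
          exact le_trans (ih.2 u _) (le_of_lt hlt)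
        · rw [if_neg hc]
          refine le_trans (ih.2 u _) (le_trans ?_ (le_of_lt hlt))
          exact (ih.1 _ _)
    refine ⟨?_, hdrain⟩
    intro u st
    rw [dfsB, (finishS_fields u _).1]
    calc esizeAL (drainB f u (markIf u st)).e ≤ esizeAL (markIf u st).e := ih.2 u _
      _ = esizeAL st.e := by rw [markIf_e]

-- A's iteration on an unmarked top node = the same iteration after B's markIf has been applied
theorem aLoop_mark_step (st : BSt) (u : Int) (rest : List Int)
    (hm : alGetD st.m u false = false) :
    aLoop (u :: rest) st.e st.m st.s st.i st.p (st.c - 1) st.r =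
      aLoop (u :: rest) (markIf u st).e (markIf u st).m (markIf u st).s (markIf u st).i
        (markIf u st).p ((markIf u st).c - 1) (markIf u st).r := by
  have hmark : markIf u st =
      ⟨st.e, alSet st.m u true, st.s, alSet st.i u st.c, st.p, st.c + 1, st.r ++ [u]⟩ := by
    simp [markIf, hm]
  have hmm : alGetD (alSet st.m u true) u false = true := by simp [alGetD_alSet]
  rw [hmark]
  rw [aLoop, aLoop]
  simp only [hm, Bool.false_eq_true, if_false, hmm, if_true]
  norm_num

-- the simulation: A's loop with top node u runs B's dfs/drain of u and continues with the rest
theorem simBoth (n : Nat) :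
    (∀ (st : BSt) (u : Int) (rest : List Int) (f : Nat), esizeAL st.e ≤ n →
        2 * esizeAL st.e + 1 ≤ f → alGetD st.m u false = true →
        aLoop (u :: rest) st.e st.m st.s st.i st.p (st.c - 1) st.r =
          (let st' := finishS u (drainB f u st);
            aLoop rest st'.e st'.m st'.s st'.i st'.p (st'.c - 1) st'.r)) ∧
    (∀ (st : BSt) (u : Int) (rest : List Int) (f : Nat), esizeAL st.e ≤ n →
        2 * esizeAL st.e + 2 ≤ f →
        aLoop (u :: rest) st.e st.m st.s st.i st.p (st.c - 1) st.r =
          (let st' := dfsB f u st;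
            aLoop rest st'.e st'.m st'.s st'.i st'.p (st'.c - 1) st'.r)) := by
  induction n using Nat.strong_induction_on with
  | _ n ih =>
    have hD : ∀ (st : BSt) (u : Int) (rest : List Int) (f : Nat), esizeAL st.e ≤ n →
        2 * esizeAL st.e + 1 ≤ f → alGetD st.m u false = true →
        aLoop (u :: rest) st.e st.m st.s st.i st.p (st.c - 1) st.r =
          (let st' := finishS u (drainB f u st);
            aLoop rest st'.e st'.m st'.s st'.i st'.p (st'.c - 1) st'.r) := by
      intro st u rest f hn hf hm
      obtain ⟨f', rfl⟩ : ∃ f', f = f' + 1 := ⟨f - 1, by omega⟩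
      rw [aLoop, drainB]
      by_cases he : alGetD st.e u [] = []
      · rw [dif_pos he, dif_pos he]
        simp only [hm, if_true, finishS]
      · have hlt : esizeAL (alSet st.e u ((alGetD st.e u []).dropLast)) < esizeAL st.e :=
          esize_alSet_dropLast_lt st.e u he
        have hlen : esizeAL (alSet st.e u ((alGetD st.e u []).dropLast)) < n :=
          lt_of_lt_of_le hlt hn
        rw [dif_neg he, dif_neg he]
        simp only [hm, if_true]
        by_cases hc : alGetD st.m ((alGetD st.e u []).getLast he) false = true
        · -- marked child: both sides continue draining u
          rw [if_pos hc, if_pos hc]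
          have hrec := (ih _ hlen).1
            { st with e := alSet st.e u ((alGetD st.e u []).dropLast) } u rest f'
            (le_refl _)
            (by show 2 * esizeAL (alSet st.e u ((alGetD st.e u []).dropLast)) + 1 ≤ f'; omega)
            hm
          simpa using hrec
        · -- unmarked child: A pushes it; B recurses into dfs of it
          rw [if_neg hc, if_neg hc]
          set child := (alGetD st.e u []).getLast he with hchild
          set st2 : BSt := { st with e := alSet st.e u ((alGetD st.e u []).dropLast),
                                     p := alSet st.p child u } with hst2
          have hsz2 : esizeAL st2.e = esizeAL (alSet st.e u ((alGetD st.e u []).dropLast)) := by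
            rw [hst2]
          have hM := (ih _ hlen).2 st2 child (u :: rest) f'
            (le_of_eq hsz2) (by rw [hsz2]; omega)
          set st3 := dfsB f' child st2 with hst3
          have he3 : esizeAL st3.e ≤ esizeAL (alSet st.e u ((alGetD st.e u []).dropLast)) := by
            have := (esize_mono f').1 child st2
            rw [hsz2] at this
            exact this
          have hm3 : alGetD st3.m u false = true := by
            refine (marks_mono f').1 child st2 u ?_
            show alGetD st.m u false = true
            exact hm
          have hD3 := (ih _ hlen).1 st3 u rest f' he3 (by omega) hm3
          calc aLoop (child :: u :: rest) (alSet st.e u ((alGetD st.e u []).dropLast)) st.m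
                st.s st.i (alSet st.p child u) (st.c - 1) st.r
              = aLoop (child :: u :: rest) st2.e st2.m st2.s st2.i st2.p (st2.c - 1) st2.r := by
                rw [hst2]
            _ = aLoop (u :: rest) st3.e st3.m st3.s st3.i st3.p (st3.c - 1) st3.r := by
                simpa using hM
            _ = _ := by simpa using hD3
    refine ⟨hD, ?_⟩
    intro st u rest f hn hf
    obtain ⟨f', rfl⟩ : ∃ f', f = f' + 1 := ⟨f - 1, by omega⟩
    rw [dfsB]
    by_cases hm : alGetD st.m u false = true
    · have hmark : markIf u st = st := by simp [markIf, hm]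
      rw [hmark]
      exact hD st u rest f' hn (by omega) hm
    · have hmf : alGetD st.m u false = false := by simpa using hm
      have hstep := aLoop_mark_step st u rest hmf
      have hm' : alGetD (markIf u st).m u false = true := by
        simp [markIf, hmf, alGetD_alSet]
      have hD' := hD (markIf u st) u rest f' (by rw [markIf_e]; exact hn)
        (by rw [markIf_e]; omega) hm'
      rw [hstep, hD']

-- the two ports agree on every input (no hypotheses needed)
theorem ports_agree (e : List (Int × List Int)) (m : List (Int × Bool))
    (s i : List (Int × Int)) :
    build_traversal e m s i = build_traversal_alt e m s i := by
  have h := (simBoth (esizeAL e)).2 ⟨e, m, s, i, [], 0, []⟩ 0 [] (2 * esizeAL e + 2)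
    (le_refl _) (le_refl _)
  unfold build_traversal build_traversal_alt
  simp only at h
  rw [show (-1 : Int) = (0 : Int) - 1 by norm_num]
  rw [h, aLoop]

-- ===== VERDICT (by name: the statement is the Claim_ definition above) =====
theorem build_traversal_spec : Claim_equal_build_traversal := by
  intro e m s i _hdom _hpre
  unfold Spec_build_traversal
  exact ports_agree e m s i
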